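-- pv_equiv track=rewrite | github.com/Originn/ChatFactoryTemplate | utils/oldplumber.py | append_related_topics
-- ===== SOURCE A (Python) =====
-- def append_related_topics(text):
--     lines = text.split('\n')
--     special_chars = ['.', ',', '?', '!', ';', ':', '>', '/']
--
--     i = len(lines) - 1
--     count_lines_without_special_chars = 0
--
--     while i >= 0 and not any(lines[i].endswith(ch) for ch in special_chars):
--         count_lines_without_special_chars += 1
--         i -= 1
--
--     # If at least two sentences adhere to the rules, append "Related Topics" at the bottom
--     if count_lines_without_special_chars >= 2:
--         lines.append("Related Topics")
--
--     return '\n'.join(lines)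
-- ===== SOURCE B (Python) =====
-- def append_related_topics(text):
--     lines = text.split('\n')
--     special = ('.', ',', '?', '!', ';', ':', '>', '/')
--
--     def clean(line):
--         return line == '' or line[-1] not in special
--
--     # count >= 2 in the original is equivalent to: the last TWO lines both lack
--     # a special final character -- so only those two lines need inspecting.
--     if len(lines) >= 2 and clean(lines[-1]) and clean(lines[-2]):
--         lines.append("Related Topics")
--     return '\n'.join(lines)
-- ===== Notes on version B (the rewrite author's own statement) =====
-- stated objective: simpler
-- what changed: Replaces A's backward early-stopping while-loop that counts trailing lines with a constant-time check of only the last two lines, using the fact that the trailing count reaches 2 iff both of them lack a special final character.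
import Mathlib
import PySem

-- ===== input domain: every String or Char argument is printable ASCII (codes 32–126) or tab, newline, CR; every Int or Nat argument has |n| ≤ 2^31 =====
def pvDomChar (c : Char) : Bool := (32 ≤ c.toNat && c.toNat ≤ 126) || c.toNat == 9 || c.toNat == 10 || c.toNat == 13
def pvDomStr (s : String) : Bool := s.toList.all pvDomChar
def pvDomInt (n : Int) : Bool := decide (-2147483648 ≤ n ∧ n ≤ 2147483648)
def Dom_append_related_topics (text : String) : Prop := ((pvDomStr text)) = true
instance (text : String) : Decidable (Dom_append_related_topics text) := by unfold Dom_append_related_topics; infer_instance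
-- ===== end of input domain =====

-- B replaces A's backward while-loop over the trailing lines with a direct inspection of
-- only the last two lines (A's count >= 2 holds iff both lack a special final character);
-- objective: simpler.

-- ===== PORT A =====
def pvSpecialChars : List (List Char) :=
  [['.'], [','], ['?'], ['!'], [';'], [':'], ['>'], ['/']]

-- any(lines[i].endswith(ch) for ch in special_chars)
def pvAnySpecial (line : List Char) : Bool :=
  pvSpecialChars.any (fun ch => PySem.Chars.endswith line ch)

-- the while loop of A: fuel n = i + 1, examines index n-1 downwards, counts until a match
def pvCountLoop (lines : List (List Char)) : Nat → Nat
  | 0 => 0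
  | n + 1 =>
    if pvAnySpecial (PySem.List.pyGetD lines (n : Int) []) then 0
    else pvCountLoop lines n + 1

def append_related_topics (text : String) : String :=
  let lines := PySem.Chars.splitOn text.toList ['\n']
  let cnt := pvCountLoop lines lines.length
  let lines := if 2 ≤ cnt then lines ++ ["Related Topics".toList] else lines
  String.ofList (PySem.Chars.join ['\n'] lines)

-- ===== PORT B =====
-- clean(line): line == '' or line[-1] not in special
def pvClean (line : List Char) : Bool :=
  line.isEmpty ||
    !((['.', ',', '?', '!', ';', ':', '>', '/'] : List Char).contains
        ((PySem.List.pyGet? line (-1)).getD ' '))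

def append_related_topics_alt (text : String) : String :=
  let lines := PySem.Chars.splitOn text.toList ['\n']
  let lines :=
    if 2 ≤ lines.length
        ∧ pvClean ((PySem.List.pyGet? lines (-1)).getD [])
        ∧ pvClean ((PySem.List.pyGet? lines (-2)).getD [])
    then lines ++ ["Related Topics".toList] else lines
  String.ofList (PySem.Chars.join ['\n'] lines)

-- ===== PRECONDITION & SPEC =====
def Spec_append_related_topics (text : String) (out : String) : Prop := out = append_related_topics_alt text
instance (text : String) (out : String) : Decidable (Spec_append_related_topics text out) := by unfold Spec_append_related_topics; infer_instance

-- ===== CLAIM (what is proved, stated in full; the proofs are below) =====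
def Claim_equal_append_related_topics : Prop := ∀ (text : String), Dom_append_related_topics text → Spec_append_related_topics text (append_related_topics text)

-- ===== LEMMAS AND PROOFS =====

theorem pvSuffix_singleton (xs : List Char) (x c : Char) : [c] <:+ xs ++ [x] ↔ x = c := by
  constructor
  · rintro ⟨t, ht⟩
    have := congrArg List.getLast? ht
    simpa [List.getLast?_append] using this.symm
  · rintro rfl; exact ⟨xs, rfl⟩

theorem pvEnds_single (xs : List Char) (x c : Char) :
    PySem.Chars.endswith (xs ++ [x]) [c] = (x == c) := by
  rw [Bool.eq_iff_iff, PySem.Chars.endswith_iff, pvSuffix_singleton, beq_iff_eq]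

theorem pvAnySpecial_append (xs : List Char) (x : Char) :
    pvAnySpecial (xs ++ [x]) =
      (['.', ',', '?', '!', ';', ':', '>', '/'] : List Char).contains x := by
  simp [pvAnySpecial, pvSpecialChars, pvEnds_single, List.contains_eq_mem]
  simp [Bool.beq_eq_decide_eq]

-- a line is clean exactly when it does not end with any special char
theorem pvClean_eq (l : List Char) : pvClean l = !pvAnySpecial l := by
  induction l using List.reverseRecOn with
  | nil => decide
  | append_singleton xs x _ =>
    simp [pvClean, PySem.List.pyGet?_neg_one_append_singleton, pvAnySpecial_append]

theorem pvCountLoop_le (lines : List (List Char)) (n : Nat) : pvCountLoop lines n ≤ n := by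
  induction n with
  | zero => simp [pvCountLoop]
  | succ m ih => unfold pvCountLoop; split <;> omega

-- A's trailing count reaches 2 iff the two last lines both lack a special ending
theorem pvCount_ge2_iff (lines : List (List Char)) (m : Nat) (hm : lines.length = m + 2) :
    2 ≤ pvCountLoop lines lines.length ↔
      (pvAnySpecial (PySem.List.pyGetD lines ((m + 1 : Nat) : Int) []) = false ∧
       pvAnySpecial (PySem.List.pyGetD lines ((m : Nat) : Int) []) = false) := by
  rw [hm]
  show 2 ≤ pvCountLoop lines (m + 2) ↔ _
  simp only [pvCountLoop, Nat.cast_add, Nat.cast_one, PySem.List.pyGetD_natCast]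
  split_ifs with h1 h2
  all_goals simp_all [List.getD_eq_getElem?_getD]

-- ===== VERDICT (by name: the statement is the Claim_ definition above) =====
theorem append_related_topics_spec : Claim_equal_append_related_topics := by
  intro text _
  unfold Spec_append_related_topics append_related_topics append_related_topics_alt
  set lines := PySem.Chars.splitOn text.toList ['\n'] with hl
  show String.ofList (PySem.Chars.join ['\n']
      (if 2 ≤ pvCountLoop lines lines.length then lines ++ ["Related Topics".toList] else lines)) =
    String.ofList (PySem.Chars.join ['\n']
      (if 2 ≤ lines.length ∧ pvClean ((PySem.List.pyGet? lines (-1)).getD []) = true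
          ∧ pvClean ((PySem.List.pyGet? lines (-2)).getD []) = true
        then lines ++ ["Related Topics".toList] else lines))
  by_cases h2 : 2 ≤ lines.length
  · obtain ⟨m, hm⟩ : ∃ m, lines.length = m + 2 := ⟨lines.length - 2, by omega⟩
    have e1 : (PySem.List.pyGet? lines (-1)).getD [] =
        PySem.List.pyGetD lines ((m + 1 : Nat) : Int) [] := by
      rw [PySem.List.pyGet?_neg_one, PySem.List.pyGetD_natCast]
      simp [List.getLast?_eq_getElem?, hm]
    have e2 : (PySem.List.pyGet? lines (-2)).getD [] =
        PySem.List.pyGetD lines ((m : Nat) : Int) [] := by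
      rw [PySem.List.pyGet?_neg_ofNat lines 2 (by omega) (by omega),
        PySem.List.pyGetD_natCast]
      simp [hm]
    have hiff := pvCount_ge2_iff lines m hm
    by_cases hc : 2 ≤ pvCountLoop lines lines.length
    · have hb := hiff.mp hc
      rw [if_pos hc, if_pos]
      refine ⟨h2, ?_, ?_⟩ <;>
        simp_all [pvClean_eq, PySem.List.pyGetD_natCast, List.getD_eq_getElem?_getD]
    · rw [if_neg hc, if_neg]
      intro ⟨_, hA, hB⟩
      rw [e1, pvClean_eq, Bool.not_eq_eq_eq_not, Bool.not_true] at hA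
      rw [e2, pvClean_eq, Bool.not_eq_eq_eq_not, Bool.not_true] at hB
      exact hc (hiff.mpr ⟨hA, hB⟩)
  · have hc : ¬ 2 ≤ pvCountLoop lines lines.length := by
      have := pvCountLoop_le lines lines.length; omega
    rw [if_neg hc, if_neg (by intro h; exact h2 h.1)]
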